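-- pv_equiv track=rewrite | github.com/PF2100/FP-Project-IST | Project1/Project-1.py | validar_cifra
-- ===== SOURCE A (Python) =====
-- def validar_cifra_entrada(tuplo):
--     if tuplo == "" or not isinstance(tuplo,str):
--         return False
--     for elem in range(len(tuplo)) :
--         if not (122>=ord(tuplo[0])>=97 and 122>=ord(tuplo[-1])>= 97) \
--         or (ord(tuplo[elem])==45 and ord(tuplo[elem+1])==45)  :
--             return False
--         elif not (122>=ord(tuplo[elem])>=97 or ord(tuplo[elem]) == 45):
--             return False
--     return True
--
-- def validar_cod_crtl(tuplo):
--     if not isinstance(tuplo,str) :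
--         return False
--     if len(tuplo[1:-1])==5 and tuplo[0] == "[" and tuplo[-1] == "]":
--         for letra in tuplo[1:-1]:
--             if not 122>=ord(letra)>=97:
--                 return False
--         return True
--     return False
--
-- def validar_cifra(tuplo,BDB):
--     '''
--     cad. carateres x cad. carateres -> booleano
--
--     Recebe uma cadeia de caracteres contenco uma cifra e uma outra cadeia de \
--     caracteres contendo uma sequencia de controlo devolvendo True se a \
--     sequencia de controlo e coerente com a cifra conforme descrita.
--
--     '''
--     if not validar_cifra_entrada(tuplo) and validar_cod_crtl(BDB):
--         return False
--     dic_novo,dic,pre_seq,pre_cifra={},{},[],[]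
--     if not (isinstance(tuplo,str) and isinstance(BDB,str)):
--         return False
--     for letras in tuplo:
--         if letras in dic :
--             dic[letras] += 1
--         else:
--             dic[letras]= 1
--
--     for val,key in sorted(((val,key) for key,val in dic.items()), reverse=True):
--         dic_novo[key]=val
--
--         dic_novo[key]=val
--     if "-" in dic_novo:
--         del dic_novo["-"]
--
--     for key in dic_novo :
--         if key not in pre_cifra:
--             for key2 in dic_novo :
--                 if dic_novo[key]==dic_novo[key2]  :
--                     pre_seq += [key2]
--             pre_cifra += sorted(pre_seq)
--
--             if len(pre_cifra)>=5:
--                 break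
--             else:
--                 pre_seq= []
--
--     return pre_cifra[0:5] == list(BDB[1:len(BDB)-1])
-- ===== SOURCE B (Python) =====
-- def validar_cifra_entrada(tuplo):
--     if not isinstance(tuplo, str) or tuplo == "":
--         return False
--     return ('a' <= tuplo[0] <= 'z' and 'a' <= tuplo[-1] <= 'z'
--             and all(c == '-' or 'a' <= c <= 'z' for c in tuplo)
--             and '--' not in tuplo)
--
--
-- def validar_cod_crtl(tuplo):
--     return (isinstance(tuplo, str) and len(tuplo) == 7
--             and tuplo[0] == '[' and tuplo[-1] == ']'
--             and all('a' <= c <= 'z' for c in tuplo[1:-1]))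
--
--
-- def validar_cifra(tuplo, BDB):
--     if not validar_cifra_entrada(tuplo) and validar_cod_crtl(BDB):
--         return False
--     counts = {}
--     for c in tuplo:
--         counts[c] = counts.get(c, 0) + 1
--     counts.pop('-', None)
--     ordered = sorted(counts, key=lambda k: (-counts[k], k))
--     return ordered[:5] == list(BDB[1:len(BDB)-1])
-- ===== Notes on version B (the rewrite author's own statement) =====
-- stated objective: simpler
-- what changed: A reverse-sorts (count,key) pairs, rebuilds them into a second dict and runs a quadratic nested loop that re-collects and re-sorts each frequency group with a break; B builds the counter, drops '-', and does one sorted(counts, key=lambda k: (-counts[k], k)) followed by a slice comparison.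
import Mathlib
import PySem

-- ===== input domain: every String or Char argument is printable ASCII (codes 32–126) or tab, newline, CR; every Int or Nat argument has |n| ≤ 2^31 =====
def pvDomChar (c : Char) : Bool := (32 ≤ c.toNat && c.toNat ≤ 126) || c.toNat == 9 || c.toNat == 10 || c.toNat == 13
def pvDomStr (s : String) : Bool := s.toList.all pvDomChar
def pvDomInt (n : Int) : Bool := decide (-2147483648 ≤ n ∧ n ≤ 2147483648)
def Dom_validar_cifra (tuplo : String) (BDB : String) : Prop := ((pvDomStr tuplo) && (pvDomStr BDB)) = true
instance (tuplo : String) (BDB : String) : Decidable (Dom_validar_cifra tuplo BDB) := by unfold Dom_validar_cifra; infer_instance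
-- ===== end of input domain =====

-- B replaces A's reverse-sorted pair list, rebuilt dict and quadratic group-collection loop by one
-- sort of the counter's keys under the key (-count, letter) and a slice comparison (objective: simpler).

-- ===== PORT A =====
-- ord(c) is ported as Char.toNat; x[i] on an index that is provably in range whenever Python
-- evaluates it is ported with pyGetD (default ' ' never read where Python reads the char).
def validar_cifra_entrada (tuplo : String) : Bool :=
  let t := tuplo.toList
  if t = [] then false
  else
    -- the early-return 'for elem in range(len(tuplo))' loop returns True iff no index trips a check
    (List.range t.length).all (fun elem =>
      let first := (PySem.List.pyGetD t (0:Int) ' ').toNat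
      let lastc := (PySem.List.pyGetD t (-1:Int) ' ').toNat
      let cur   := (PySem.List.pyGetD t ((elem : Nat) : Int) ' ').toNat
      let nxt   := (PySem.List.pyGetD t (((elem : Nat) : Int) + 1) ' ').toNat
      if (!(decide (122 ≥ first) && decide (first ≥ 97) && decide (122 ≥ lastc) && decide (lastc ≥ 97))
          || (cur == 45 && nxt == 45)) then false
      else if !((decide (122 ≥ cur) && decide (cur ≥ 97)) || cur == 45) then false
      else true)

def validar_cod_crtl (tuplo : String) : Bool :=
  let t := tuplo.toList
  let mid := PySem.List.slice t (some 1) (some (-1))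
  if (mid.length == 5) && (PySem.List.pyGetD t (0:Int) ' ' == '[') && (PySem.List.pyGetD t (-1:Int) ' ' == ']') then
    mid.all (fun letra => decide (122 ≥ letra.toNat) && decide (letra.toNat ≥ 97))
  else false

-- A's third loop (over dic_novo with pre_seq/pre_cifra accumulators and a break at length ≥ 5)
def aLoopA (dn : PySem.Dict Char Int) : List Char → List Char → List Char → List Char
  | [], _, pre_cifra => pre_cifra
  | key :: rest, pre_seq, pre_cifra =>
    if pre_cifra.contains key then aLoopA dn rest pre_seq pre_cifra
    else
      let pre_seq2 := dn.keys.foldl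
        (fun acc key2 => if dn.getD key 0 == dn.getD key2 0 then acc ++ [key2] else acc) pre_seq
      let pre_cifra2 := pre_cifra ++ PySem.List.sorted pre_seq2 (fun x => x) false
      if 5 ≤ pre_cifra2.length then pre_cifra2
      else aLoopA dn rest [] pre_cifra2

def validar_cifra (tuplo : String) (BDB : String) : Bool :=
  if !validar_cifra_entrada tuplo && validar_cod_crtl BDB then false
  else
    let dic := tuplo.toList.foldl
      (fun d c => if d.contains c then d.insert c (d.getD c 0 + 1) else d.insert c 1) PySem.Dict.empty
    let sl := PySem.List.sorted2 (dic.items.map (fun p => (p.2, p.1))) (fun q => q.1) (fun q => q.2) true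
    let dic_novo := sl.foldl (fun d q => d.insert q.2 q.1) PySem.Dict.empty
    let dic_novo := if dic_novo.contains '-' then dic_novo.erase '-' else dic_novo
    let pre_cifra := aLoopA dic_novo dic_novo.keys [] []
    decide (PySem.List.slice pre_cifra (some 0) (some 5)
            = (PySem.Str.slice BDB (some 1) (some (PySem.Str.len BDB - 1))).toList)

-- ===== PORT B =====
def validar_cifra_entrada_alt (tuplo : String) : Bool :=
  let t := tuplo.toList
  if t = [] then false
  else
    decide ('a' ≤ PySem.List.pyGetD t (0:Int) ' ') && decide (PySem.List.pyGetD t (0:Int) ' ' ≤ 'z')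
    && decide ('a' ≤ PySem.List.pyGetD t (-1:Int) ' ') && decide (PySem.List.pyGetD t (-1:Int) ' ' ≤ 'z')
    && t.all (fun c => c == '-' || (decide ('a' ≤ c) && decide (c ≤ 'z')))
    && !(PySem.Str.isIn "--" tuplo)

def validar_cod_crtl_alt (tuplo : String) : Bool :=
  let t := tuplo.toList
  (t.length == 7) && (PySem.List.pyGetD t (0:Int) ' ' == '[') && (PySem.List.pyGetD t (-1:Int) ' ' == ']')
  && (PySem.List.slice t (some 1) (some (-1))).all (fun c => decide ('a' ≤ c) && decide (c ≤ 'z'))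

def validar_cifra_alt (tuplo : String) (BDB : String) : Bool :=
  if !validar_cifra_entrada_alt tuplo && validar_cod_crtl_alt BDB then false
  else
    let counts := tuplo.toList.foldl (fun d c => d.insert c (d.getD c 0 + 1)) PySem.Dict.empty
    let counts := counts.erase '-'
    let ordered := PySem.List.sorted2 counts.keys (fun k => -(counts.getD k 0)) (fun k => k) false
    decide (PySem.List.slice ordered (some 0) (some 5)
            = (PySem.Str.slice BDB (some 1) (some (PySem.Str.len BDB - 1))).toList)

-- ===== PRECONDITION & SPEC =====
def Spec_validar_cifra (tuplo : String) (BDB : String) (out : Bool) : Prop := out = validar_cifra_alt tuplo BDB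
instance (tuplo : String) (BDB : String) (out : Bool) : Decidable (Spec_validar_cifra tuplo BDB out) := by unfold Spec_validar_cifra; infer_instance

-- ===== CLAIM (what is proved, stated in full; the proofs are below) =====
def Claim_equal_validar_cifra : Prop := ∀ (tuplo : String) (BDB : String), Dom_validar_cifra tuplo BDB → Spec_validar_cifra tuplo BDB (validar_cifra tuplo BDB)

-- ===== LEMMAS AND PROOFS =====

theorem char_le_toNat (a c : Char) : (a ≤ c) ↔ a.toNat ≤ c.toNat := ge_iff_le
theorem char_eq_toNat (c : Char) : (c.toNat = 45) ↔ c = '-' := eq_iff_eq_of_cmp_eq_cmp rfl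


theorem range_chk (c : Char) :
    (decide (122 ≥ c.toNat) && decide (c.toNat ≥ 97)) = (decide ('a' ≤ c) && decide (c ≤ 'z')) := by
  have ha : ('a' ≤ c) ↔ 97 ≤ c.toNat := char_le_toNat 'a' c
  have hz : (c ≤ 'z') ↔ c.toNat ≤ 122 := char_le_toNat c 'z'
  rw [Bool.eq_iff_iff]
  simp only [Bool.and_eq_true, decide_eq_true_eq, ha, hz, ge_iff_le]
  omega

theorem crtl_eq (tuplo : String) : validar_cod_crtl tuplo = validar_cod_crtl_alt tuplo := by
  unfold validar_cod_crtl validar_cod_crtl_alt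
  dsimp only
  have hmid : ((PySem.List.slice tuplo.toList (some 1) (some (-1))).length == 5)
      = (tuplo.toList.length == 7) := by
    rw [PySem.List.length_slice]
    rw [Bool.eq_iff_iff]
    simp only [beq_iff_eq]
    simp [PySem.List.clampIdx]
    by_cases h : tuplo = ""
    · subst h; simp
    · simp only [h, if_false]
      have hne : tuplo.length ≠ 0 := fun hc => h (String.length_eq_zero_iff.mp hc)
      omega
  have hall : (PySem.List.slice tuplo.toList (some 1) (some (-1))).all
        (fun letra => decide (122 ≥ letra.toNat) && decide (letra.toNat ≥ 97))
      = (PySem.List.slice tuplo.toList (some 1) (some (-1))).all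
        (fun c => decide ('a' ≤ c) && decide (c ≤ 'z')) := by
    exact congrArg _ (funext range_chk)
  rw [hmid, hall]
  cases h : ((tuplo.toList.length == 7) && (PySem.List.pyGetD tuplo.toList (0:Int) ' ' == '[')
      && (PySem.List.pyGetD tuplo.toList (-1:Int) ' ' == ']')) <;> simp

theorem pair_prefix_iff (j : Nat) (t : List Char) :
    ['-','-'] <+: t.drop j ↔ j + 1 < t.length ∧ t.getD j ' ' = '-' ∧ t.getD (j+1) ' ' = '-' := by
  constructor
  · rintro ⟨m', hm⟩
    have hlen : j + 2 ≤ t.length := by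
      have := congrArg List.length hm
      simp [List.length_drop] at this
      omega
    have h0 : t[j]? = some '-' := by
      have := congrArg (fun l => l[0]?) hm
      simpa [List.getElem?_drop] using this.symm
    have h1 : t[j+1]? = some '-' := by
      have := congrArg (fun l => l[1]?) hm
      simpa [List.getElem?_drop] using this.symm
    refine ⟨by omega, ?_, ?_⟩ <;> simp [List.getD_eq_getElem?_getD, h0, h1]
  · rintro ⟨hlt, h0, h1⟩
    have hj : j < t.length := by omega
    have e1 : t.drop j = t[j] :: t.drop (j+1) := List.drop_eq_getElem_cons hj
    have e2 : t.drop (j+1) = t[j+1] :: t.drop (j+2) := List.drop_eq_getElem_cons hlt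
    have g0 : t[j] = '-' := by simpa [List.getD_eq_getElem?_getD, List.getElem?_eq_getElem hj] using h0
    have g1 : t[j+1] = '-' := by simpa [List.getD_eq_getElem?_getD, List.getElem?_eq_getElem hlt] using h1
    exact ⟨t.drop (j+2), by rw [e1, e2, g0, g1]; rfl⟩

theorem dashdash_iff (tuplo : String) :
    PySem.Str.isIn "--" tuplo = true ↔
      ∃ j, j + 1 < tuplo.toList.length ∧ tuplo.toList.getD j ' ' = '-' ∧ tuplo.toList.getD (j+1) ' ' = '-' := by
  have hb : PySem.Str.isIn "--" tuplo = PySem.Chars.isIn ['-','-'] tuplo.toList := by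
    simp [pysem]
  rw [hb, ← PySem.Chars.exists_prefix_drop_iff_isIn]
  constructor
  · rintro ⟨j, hj⟩; exact ⟨j, (pair_prefix_iff j _).mp hj⟩
  · rintro ⟨j, hj⟩; exact ⟨j, (pair_prefix_iff j _).mpr hj⟩

theorem if_if_prop (P Q : Prop) [Decidable P] [Decidable Q] :
    ((if P then false else if Q then false else true) = true) ↔ ¬P ∧ ¬Q := by
  split_ifs <;> simp_all

theorem entrada_eq (tuplo : String) : validar_cifra_entrada tuplo = validar_cifra_entrada_alt tuplo := by
  unfold validar_cifra_entrada validar_cifra_entrada_alt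
  dsimp only
  by_cases ht : tuplo.toList = []
  · simp [ht]
  · simp only [ht, if_false]
    rw [Bool.eq_iff_iff]
    have hn : 0 < tuplo.toList.length := List.length_pos_iff.mpr ht
    simp only [List.all_eq_true, List.mem_range, if_if_prop, Bool.or_eq_false_iff,
      Bool.and_eq_false_iff, Bool.not_eq_false', Bool.and_eq_true, Bool.or_eq_true,
      decide_eq_true_eq, decide_eq_false_iff_not, beq_iff_eq, beq_eq_false_iff_ne,
      Bool.not_eq_true', ge_iff_le, dashdash_iff]
    rw [show (PySem.Str.isIn "--" tuplo = false) ↔ ¬(PySem.Str.isIn "--" tuplo = true) from by simp,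
      dashdash_iff]
    have e1 : PySem.List.pyGetD tuplo.toList (-1) ' ' = tuplo.toList.getLast ht :=
      PySem.List.pyGetD_neg_one tuplo.toList ' ' ht
    have e2 : ∀ x : Nat, PySem.List.pyGetD tuplo.toList ((x : Int) + 1) ' '
        = tuplo.toList.getD (x + 1) ' ' := fun x => by
      rw [show ((x : Int) + 1) = (((x + 1 : Nat)) : Int) by push_cast; ring,
        PySem.List.pyGetD_natCast]
    simp only [e1, e2, PySem.List.pyGetD_zero, PySem.List.pyGetD_natCast]
    have hch : ∀ a c : Char, (a ≤ c) ↔ a.toNat ≤ c.toNat := char_le_toNat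
    have hdash : ∀ c : Char, (c.toNat = 45) ↔ c = '-' := char_eq_toNat
    have ha : 'a'.toNat = 97 := rfl
    have hz : 'z'.toNat = 122 := rfl
    have hsp : (' ').toNat = 32 := rfl
    have hmem : ∀ x : Nat, x < tuplo.toList.length → tuplo.toList.getD x ' ' ∈ tuplo.toList := by
      intro x hx
      rw [List.getD_eq_getElem?_getD, List.getElem?_eq_getElem hx]
      exact List.getElem_mem hx
    have hidx : ∀ c ∈ tuplo.toList, ∃ x : Nat, x < tuplo.toList.length ∧ tuplo.toList.getD x ' ' = c := by
      intro c hc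
      obtain ⟨x, hx, hxe⟩ := List.mem_iff_getElem.mp hc
      exact ⟨x, hx, by rw [List.getD_eq_getElem?_getD, List.getElem?_eq_getElem hx]; exact hxe⟩
    have hoob : ∀ x : Nat, ¬ (x < tuplo.toList.length) → tuplo.toList.getD x ' ' = ' ' := by
      intro x hx
      rw [List.getD_eq_getElem?_getD, List.getElem?_eq_none (by omega)]
      rfl
    constructor
    · intro H
      obtain ⟨h01, -⟩ := H 0 hn
      push_neg at h01
      obtain ⟨⟨⟨⟨hA1, hA2⟩, hA3⟩, hA4⟩, -⟩ := h01
      refine ⟨⟨⟨⟨⟨?_, ?_⟩, ?_⟩, ?_⟩, ?_⟩, ?_⟩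
      · exact (hch _ _).mpr (by rw [ha]; omega)
      · exact (hch _ _).mpr (by rw [hz]; omega)
      · exact (hch _ _).mpr (by rw [ha]; omega)
      · exact (hch _ _).mpr (by rw [hz]; omega)
      · intro c hc
        obtain ⟨x, hx, hxe⟩ := hidx c hc
        obtain ⟨-, h2⟩ := H x hx
        subst hxe
        rcases not_and_or.mp h2 with h | h
        · push_neg at h
          exact Or.inr ⟨(hch _ _).mpr (by rw [ha]; omega), (hch _ _).mpr (by rw [hz]; omega)⟩
        · push_neg at h
          exact Or.inl ((hdash _).mp h)
      · rintro ⟨j, hj, hj1, hj2⟩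
        obtain ⟨h1, -⟩ := H j (by omega)
        push_neg at h1
        exact h1.2 ((hdash _).mpr hj1) ((hdash _).mpr hj2)
    · rintro ⟨⟨⟨⟨⟨hB1, hB2⟩, hB3⟩, hB4⟩, hall⟩, hnodd⟩
      intro x hx
      rw [hch, ha] at hB1 hB3
      rw [hch, hz] at hB2 hB4
      constructor
      · push_neg
        refine ⟨⟨⟨⟨by omega, by omega⟩, by omega⟩, by omega⟩, ?_⟩
        rintro hc45 hn45
        by_cases hx1 : x + 1 < tuplo.toList.length
        · exact hnodd ⟨x, hx1, (hdash _).mp hc45, (hdash _).mp hn45⟩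
        · rw [hoob (x+1) hx1, hsp] at hn45
          omega
      · push_neg
        intro hrange
        rcases hall _ (hmem x hx) with hd | ⟨hr1, hr2⟩
        · exact (hdash _).mpr hd
        · rw [hch, ha] at hr1
          rw [hch, hz] at hr2
          omega

theorem sorted2_eq_sorted_lex {α : Type} (xs : List α) (k1 : α → Int) (k2 : α → Char) (rev : Bool) :
    PySem.List.sorted2 xs k1 k2 rev = PySem.List.sorted xs (fun a => toLex (k1 a, k2 a)) rev := by
  have hf : (fun a b => decide (k1 a < k1 b) || (!decide (k1 b < k1 a) && decide (k2 a < k2 b)))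
      = (fun a b : α => decide ((toLex (k1 a, k2 a)) < toLex (k1 b, k2 b))) := by
    funext a b
    rw [Bool.eq_iff_iff]
    simp only [Bool.or_eq_true, Bool.and_eq_true, Bool.not_eq_true', decide_eq_true_eq,
      decide_eq_false_iff_not, Prod.Lex.toLex_lt_toLex]
    constructor
    · rintro (h | ⟨h1, h2⟩)
      · exact Or.inl h
      · rcases lt_trichotomy (k1 a) (k1 b) with h' | h' | h'
        · exact Or.inl h'
        · exact Or.inr ⟨h', h2⟩
        · exact absurd h' h1
    · rintro (h | ⟨h1, h2⟩)
      · exact Or.inl h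
      · exact Or.inr ⟨by rw [h1]; exact lt_irrefl _, h2⟩
  have hf' : (fun a b => decide (k1 b < k1 a) || (!decide (k1 a < k1 b) && decide (k2 b < k2 a)))
      = (fun a b : α => decide ((toLex (k1 b, k2 b)) < toLex (k1 a, k2 a))) :=
    funext fun a => funext fun b => congrFun (congrFun hf b) a
  cases rev
  · rw [PySem.List.sorted_eq_foldl_insertBy]
    simp only [PySem.List.sorted2, hf, Bool.false_eq_true, if_false]
  · rw [PySem.List.sorted_rev_eq_foldl_insertBy]
    simp only [PySem.List.sorted2, hf', if_true]

-- canonical ascending key (-count, letter) and A's descending sort key (count, letter)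
def lkB (dn : PySem.Dict Char Int) (k : Char) : Lex (Int × Char) := toLex (-(dn.getD k 0), k)
def lkA (dn : PySem.Dict Char Int) (k : Char) : Lex (Int × Char) := toLex (dn.getD k 0, k)

theorem lkB_injective (dn : PySem.Dict Char Int) : Function.Injective (lkB dn) := by
  intro a b h
  have := congrArg (fun x => (ofLex x).2) h
  simpa [lkB] using this

theorem filter_split_of_pairwise {α : Type} (p : α → Bool) (l : List α)
    (h : l.Pairwise (fun a b => p b = true → p a = true)) :
    l = l.filter p ++ l.filter (fun x => !p x) := by
  induction l with
  | nil => rfl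
  | cons a t ih =>
    rw [List.pairwise_cons] at h
    by_cases hp : p a = true
    · simp only [List.filter_cons, hp, if_pos, cond_true, Bool.not_true, Bool.false_eq_true,
        if_false, List.cons_append]
      exact congrArg (a :: ·) (ih h.2)
    · have hnone : ∀ b ∈ t, p b = false := by
        intro b hb
        cases hpb : p b
        · rfl
        · exact absurd (h.1 b hb hpb) hp
      have h1 : t.filter p = [] := List.filter_eq_nil_iff.mpr (by intro b hb; simp [hnone b hb])
      have h2 : t.filter (fun x => !p x) = t := List.filter_eq_self.mpr (by intro b hb; simp [hnone b hb])
      simp [List.filter_cons, hp, h1, h2]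

theorem aLoopA_skip (dn : PySem.Dict Char Int) (skip KS ps pc : List Char)
    (h : ∀ k ∈ skip, pc.contains k = true) :
    aLoopA dn (skip ++ KS) ps pc = aLoopA dn KS ps pc := by
  induction skip with
  | nil => rfl
  | cons a s ih =>
    have ha := h a (by simp)
    simp only [List.cons_append, aLoopA, ha, if_pos]
    exact ih (fun k hk => h k (by simp [hk]))

theorem aloop_spec (dn : PySem.Dict Char Int) (hnod : dn.keys.Nodup)
    (hpw : dn.keys.Pairwise (fun a b => lkA dn b < lkA dn a)) :
    ∀ (N : Nat) (KS pc : List Char), KS.length ≤ N →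
    KS <:+ dn.keys →
    (∀ k ∈ KS, ∀ k2 ∈ dn.keys, dn.getD k2 0 = dn.getD k 0 → k2 ∈ KS) →
    (∀ k ∈ KS, pc.contains k = false) →
    ∃ R, aLoopA dn KS [] pc = pc ++ R ∧ R <+: PySem.List.sorted KS (lkB dn) false ∧
      (R = PySem.List.sorted KS (lkB dn) false ∨ 5 ≤ pc.length + R.length) := by
  intro N
  induction N with
  | zero =>
    intro KS pc hlen _ _ _
    have : KS = [] := List.length_eq_zero_iff.mp (Nat.le_zero.mp hlen)
    subst this
    exact ⟨[], by simp [aLoopA], by simp, Or.inl (by simp [PySem.List.sorted])⟩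
  | succ N ih =>
    intro KS pc hlen hsuf hclosed hdisj
    match hKS : KS with
    | [] => exact ⟨[], by simp [aLoopA], by simp, Or.inl (by simp [PySem.List.sorted])⟩
    | key :: rest =>
      subst hKS
      have hkeymem : key ∈ key :: rest := by simp
      have hnodKS : (key :: rest).Nodup := List.IsSuffix.nodup hsuf hnod
      have hpwKS : (key :: rest).Pairwise (fun a b => lkA dn b < lkA dn a) :=
        hpw.sublist hsuf.sublist
      -- A's inner loop collects the group of key
      have hfold : dn.keys.foldl
          (fun acc key2 => if dn.getD key 0 == dn.getD key2 0 then acc ++ [key2] else acc) []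
          = dn.keys.filter (fun k2 => dn.getD key 0 == dn.getD k2 0) := by
        rw [PySem.List.foldl_append_if_eq_filter]
        rfl
      -- prefix of dn.keys contributes nothing to the group
      have hfilter : dn.keys.filter (fun k2 => dn.getD key 0 == dn.getD k2 0)
          = (key :: rest).filter (fun k2 => dn.getD key 0 == dn.getD k2 0) := by
        obtain ⟨pre, hpre⟩ := hsuf
        have hnodAll : (pre ++ key :: rest).Nodup := by rw [hpre]; exact hnod
        have hpre_nil : pre.filter (fun k2 => dn.getD key 0 == dn.getD k2 0) = [] := by
          apply List.filter_eq_nil_iff.mpr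
          intro k2 hk2
          cases hpk : (dn.getD key 0 == dn.getD k2 0)
          · simp
          · exfalso
            have hk2mem : k2 ∈ dn.keys := by rw [← hpre]; exact List.mem_append_left _ hk2
            have : k2 ∈ key :: rest := hclosed key hkeymem k2 hk2mem (beq_iff_eq.mp hpk).symm
            exact (List.disjoint_of_nodup_append hnodAll) hk2 this
        rw [← hpre, List.filter_append, hpre_nil, List.nil_append]
      have hhead : ∀ b ∈ rest, lkA dn b < lkA dn key := fun b hb =>
        (List.pairwise_cons.mp hpwKS).1 b hb
      have hlkA_le : ∀ a ∈ key :: rest, dn.getD a 0 ≤ dn.getD key 0 := by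
        intro a ha
        rcases List.mem_cons.mp ha with rfl | ha
        · exact le_refl _
        · have h := hhead a ha
          unfold lkA at h
          rw [Prod.Lex.toLex_lt_toLex] at h
          rcases h with h | ⟨h, -⟩ <;> omega
      have hpimp : (key :: rest).Pairwise
          (fun a b => (dn.getD key 0 == dn.getD b 0) = true → (dn.getD key 0 == dn.getD a 0) = true) := by
        refine List.Pairwise.imp_of_mem ?_ hpwKS
        intro a b ha hb hR hpb
        have h1 : dn.getD b 0 = dn.getD key 0 := (beq_iff_eq.mp hpb).symm
        have h2 : dn.getD a 0 ≤ dn.getD key 0 := hlkA_le a ha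
        have h3 : dn.getD b 0 ≤ dn.getD a 0 := by
          unfold lkA at hR
          rw [Prod.Lex.toLex_lt_toLex] at hR
          rcases hR with h | ⟨h, -⟩ <;> omega
        exact beq_iff_eq.mpr (by omega)
      have hsplit : key :: rest
          = (key :: rest).filter (fun k2 => dn.getD key 0 == dn.getD k2 0)
            ++ (key :: rest).filter (fun x => !(dn.getD key 0 == dn.getD x 0)) :=
        filter_split_of_pairwise _ _ hpimp
      have hpkey : (dn.getD key 0 == dn.getD key 0) = true := beq_iff_eq.mpr rfl
      have hgcons : (key :: rest).filter (fun k2 => dn.getD key 0 == dn.getD k2 0)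
          = key :: rest.filter (fun k2 => dn.getD key 0 == dn.getD k2 0) := by
        simp [List.filter_cons, hpkey]
      have hr2 : (key :: rest).filter (fun x => !(dn.getD key 0 == dn.getD x 0))
          = rest.filter (fun x => !(dn.getD key 0 == dn.getD x 0)) := by
        simp [List.filter_cons]
      have hmemg : ∀ k ∈ (key :: rest).filter (fun k2 => dn.getD key 0 == dn.getD k2 0),
          dn.getD k 0 = dn.getD key 0 := fun k hk =>
        (beq_iff_eq.mp ((List.mem_filter.mp hk).2)).symm
      have hmemr2 : ∀ k ∈ rest.filter (fun x => !(dn.getD key 0 == dn.getD x 0)),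
          dn.getD k 0 < dn.getD key 0 := by
        intro k hk
        have h1 := (List.mem_filter.mp hk).2
        simp only [Bool.not_eq_true'] at h1
        have h2 : k ∈ rest := List.mem_of_mem_filter hk
        have h3 := hlkA_le k (by simp [h2])
        have h4 : dn.getD key 0 ≠ dn.getD k 0 := by
          intro he
          rw [beq_iff_eq.mpr he] at h1
          exact Bool.true_eq_false.mp h1
        omega
      have hCsplit : PySem.List.sorted (key :: rest) (lkB dn) false
          = PySem.List.sorted ((key :: rest).filter (fun k2 => dn.getD key 0 == dn.getD k2 0)) (fun x => x) false
            ++ PySem.List.sorted (rest.filter (fun x => !(dn.getD key 0 == dn.getD x 0))) (lkB dn) false := by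
        refine PySem.List.eq_of_perm_of_pairwise_le_of_injective (lkB dn) (lkB_injective dn)
          ?_ (PySem.List.sorted_pairwise _ _) ?_
        · refine (PySem.List.sorted_perm _ _ _).trans ?_
          refine List.Perm.symm ?_
          refine ((List.Perm.append (PySem.List.sorted_perm _ _ _) (PySem.List.sorted_perm _ _ _)).trans ?_)
          rw [← hr2, ← hsplit]
        · rw [List.pairwise_append]
          refine ⟨?_, PySem.List.sorted_pairwise _ _, ?_⟩
          · refine List.Pairwise.imp_of_mem ?_ (PySem.List.sorted_pairwise _ (fun x => x))
            intro a b ha hb hab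
            have hna := hmemg a ((PySem.List.mem_sorted _ _ _ _).mp ha)
            have hnb := hmemg b ((PySem.List.mem_sorted _ _ _ _).mp hb)
            unfold lkB
            rw [Prod.Lex.toLex_le_toLex]
            right
            exact ⟨by omega, hab⟩
          · intro a ha b hb
            have hna := hmemg a ((PySem.List.mem_sorted _ _ _ _).mp ha)
            have hnb := hmemr2 b ((PySem.List.mem_sorted _ _ _ _).mp hb)
            unfold lkB
            rw [Prod.Lex.toLex_le_toLex]
            left
            omega
      -- one unfolding of the loop
      have hckey : pc.contains key = false := hdisj key hkeymem
      have hstep : aLoopA dn (key :: rest) [] pc =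
          (if 5 ≤ (pc ++ PySem.List.sorted ((key :: rest).filter (fun k2 => dn.getD key 0 == dn.getD k2 0)) (fun x => x) false).length
           then pc ++ PySem.List.sorted ((key :: rest).filter (fun k2 => dn.getD key 0 == dn.getD k2 0)) (fun x => x) false
           else aLoopA dn rest [] (pc ++ PySem.List.sorted ((key :: rest).filter (fun k2 => dn.getD key 0 == dn.getD k2 0)) (fun x => x) false)) := by
        simp only [aLoopA, hckey, Bool.false_eq_true, if_false]
        rw [hfold, hfilter]
      by_cases hbig : 5 ≤ (pc ++ PySem.List.sorted ((key :: rest).filter (fun k2 => dn.getD key 0 == dn.getD k2 0)) (fun x => x) false).length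
      · refine ⟨_, by rw [hstep, if_pos hbig], ⟨_, hCsplit.symm⟩, Or.inr ?_⟩
        rw [List.length_append] at hbig
        exact hbig
      · rw [hstep, if_neg hbig]
        have hrest_split : rest = rest.filter (fun k2 => dn.getD key 0 == dn.getD k2 0)
            ++ rest.filter (fun x => !(dn.getD key 0 == dn.getD x 0)) := by
          have h := hsplit
          rw [hgcons, hr2] at h
          simpa using h
        have hsplit' : key :: rest
            = (key :: rest).filter (fun k2 => dn.getD key 0 == dn.getD k2 0)
              ++ rest.filter (fun x => !(dn.getD key 0 == dn.getD x 0)) := by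
          rw [← hr2]; exact hsplit
        have hskip : ∀ k ∈ rest.filter (fun k2 => dn.getD key 0 == dn.getD k2 0),
            (pc ++ PySem.List.sorted ((key :: rest).filter (fun k2 => dn.getD key 0 == dn.getD k2 0)) (fun x => x) false).contains k = true := by
          intro k hk
          apply List.contains_iff_mem.mpr
          apply List.mem_append_right
          apply (PySem.List.mem_sorted _ _ _ _).mpr
          rw [hgcons]
          exact List.mem_cons_of_mem _ hk
        have hcall : aLoopA dn rest []
              (pc ++ PySem.List.sorted ((key :: rest).filter (fun k2 => dn.getD key 0 == dn.getD k2 0)) (fun x => x) false)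
            = aLoopA dn (rest.filter (fun x => !(dn.getD key 0 == dn.getD x 0))) []
              (pc ++ PySem.List.sorted ((key :: rest).filter (fun k2 => dn.getD key 0 == dn.getD k2 0)) (fun x => x) false) := by
          exact (congrArg (fun L => aLoopA dn L []
              (pc ++ PySem.List.sorted ((key :: rest).filter (fun k2 => dn.getD key 0 == dn.getD k2 0)) (fun x => x) false))
            hrest_split).trans (aLoopA_skip dn _ _ _ _ hskip)
        rw [hcall]
        have hlen2 : (rest.filter (fun x => !(dn.getD key 0 == dn.getD x 0))).length ≤ N := by
          have h1 := List.length_filter_le (fun x => !(dn.getD key 0 == dn.getD x 0)) rest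
          simp only [List.length_cons] at hlen
          omega
        have hsuf2 : rest.filter (fun x => !(dn.getD key 0 == dn.getD x 0)) <:+ dn.keys :=
          List.IsSuffix.trans ⟨_, hsplit'.symm⟩ hsuf
        have hclosed2 : ∀ k ∈ rest.filter (fun x => !(dn.getD key 0 == dn.getD x 0)),
            ∀ k2 ∈ dn.keys, dn.getD k2 0 = dn.getD k 0 →
              k2 ∈ rest.filter (fun x => !(dn.getD key 0 == dn.getD x 0)) := by
          intro k hk k2 hk2 he
          have hkKS : k ∈ key :: rest := List.mem_cons_of_mem _ (List.mem_of_mem_filter hk)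
          have hk2KS : k2 ∈ key :: rest := hclosed k hkKS k2 hk2 he
          have hklt := hmemr2 k hk
          rw [hsplit'] at hk2KS
          rcases List.mem_append.mp hk2KS with hg | hr
          · exact absurd (hmemg k2 hg) (by omega)
          · exact hr
        have hdisj2 : ∀ k ∈ rest.filter (fun x => !(dn.getD key 0 == dn.getD x 0)),
            (pc ++ PySem.List.sorted ((key :: rest).filter (fun k2 => dn.getD key 0 == dn.getD k2 0)) (fun x => x) false).contains k = false := by
          intro k hk
          cases hc : (pc ++ PySem.List.sorted ((key :: rest).filter (fun k2 => dn.getD key 0 == dn.getD k2 0)) (fun x => x) false).contains k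
          · rfl
          · exfalso
            rcases List.mem_append.mp (List.contains_iff_mem.mp hc) with hpc | hgid
            · have h1 := hdisj k (List.mem_cons_of_mem _ (List.mem_of_mem_filter hk))
              have h2 := List.contains_iff_mem.mpr hpc
              rw [h1] at h2
              exact Bool.false_ne_true h2
            · have hkin := (PySem.List.mem_sorted _ _ _ _).mp hgid
              have h1 := hmemg k hkin
              have h2 := hmemr2 k hk
              omega
        obtain ⟨R', hR'eq, hR'pre, hR'alt⟩ := ih _ _ hlen2 hsuf2 hclosed2 hdisj2
        refine ⟨PySem.List.sorted ((key :: rest).filter (fun k2 => dn.getD key 0 == dn.getD k2 0)) (fun x => x) false ++ R', ?_, ?_, ?_⟩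
        · rw [hR'eq, List.append_assoc]
        · rw [hCsplit]
          exact (List.prefix_append_right_inj _).mpr hR'pre
        · rcases hR'alt with h | h
          · left; rw [hCsplit, h]
          · right
            rw [List.length_append] at h
            rw [List.length_append]
            omega

theorem take_eq_of_prefix_of_len (R C : List Char) (h : R <+: C) (h5 : 5 ≤ R.length) :
    R.take 5 = C.take 5 := by
  obtain ⟨t, rfl⟩ := h
  rw [List.take_append_of_le_length h5]

-- A's first counting loop is Counter(tuplo)
theorem counter_fold_eq (xs : List Char) :
    xs.foldl (fun d c => if d.contains c = true then d.insert c (d.getD c 0 + 1) else d.insert c 1)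
      PySem.Dict.empty = PySem.Dict.counter xs := by
  refine (PySem.List.foldl_congr_mem _ _ (fun d (c : Char) => d.insert c (d.getD c 0 + 1)) _
    (fun acc x _ => by
      by_cases hc : acc.contains x = true
      · rw [if_pos hc]
      · rw [if_neg hc]
        show acc.insert x 1 = acc.insert x (acc.getD x 0 + 1)
        rw [PySem.Dict.getD_of_not_contains _ _ (Bool.not_eq_true _ ▸ hc)]
        norm_num)).trans
    (PySem.Dict.foldl_insert_getD_add_one_eq_counter xs)

theorem if_erase_eq (d : PySem.Dict Char Int) :
    (if d.contains '-' = true then d.erase '-' else d) = d.erase '-' := by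
  by_cases h : d.contains '-' = true
  · rw [if_pos h]
  · rw [if_neg h]
    apply PySem.Dict.ext
    show d.items = d.items.filter _
    symm
    apply List.filter_eq_self.mpr
    intro p hp
    have : p.1 ≠ '-' := by
      intro he
      exact h ((PySem.Dict.contains_iff_mem_keys _ _).mpr (he ▸ PySem.Dict.mem_keys_of_mem_items _ hp))
    simpa using this
  
theorem getD_eq_of_items_perm (d1 d2 : PySem.Dict Char Int)
    (hp : d1.items.Perm d2.items) (h1 : d1.keys.Nodup) (h2 : d2.keys.Nodup) (k : Char) :
    d1.getD k 0 = d2.getD k 0 := by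
  cases hget : d1.get? k with
  | some v =>
    have hm : (k, v) ∈ d2.items := hp.mem_iff.mp (PySem.Dict.mem_items_of_get?_eq_some _ hget)
    rw [PySem.Dict.getD_of_get?_eq_some _ _ hget, PySem.Dict.getD_of_mem_items _ hm h2]
  | none =>
    have hk1 : k ∉ d1.keys := (PySem.Dict.get?_eq_none_iff_not_mem_keys _ _).mp hget
    have hk2 : k ∉ d2.keys := by
      intro hk
      exact hk1 ((hp.map Prod.fst).mem_iff.mpr hk)
    rw [PySem.Dict.getD_of_get?_eq_none _ _ hget,
      PySem.Dict.getD_of_not_contains _ _ (by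
        cases hc : d2.contains k
        · rfl
        · exact absurd ((PySem.Dict.contains_iff_mem_keys _ _).mp hc) hk2)]

-- the A-side pipeline, named for the proofs
def slA (xs : List Char) : List (Int × Char) :=
  PySem.List.sorted ((PySem.Dict.counter xs).items.map (fun p => (p.2, p.1)))
    (fun q => toLex (q.1, q.2)) true
def dn0A (xs : List Char) : PySem.Dict Char Int :=
  (slA xs).foldl (fun d q => d.insert q.2 q.1) PySem.Dict.empty
def dnA (xs : List Char) : PySem.Dict Char Int := (dn0A xs).erase '-'

theorem slA_snd_nodup (xs : List Char) : ((slA xs).map (fun q => q.2)).Nodup := by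
  have hperm : (slA xs).Perm ((PySem.Dict.counter xs).items.map (fun p => (p.2, p.1))) :=
    PySem.List.sorted_perm _ _ _
  refine (hperm.map (fun q => q.2)).symm.nodup ?_
  rw [List.map_map]
  have : ((fun q : Int × Char => q.2) ∘ fun p : Char × Int => (p.2, p.1)) = Prod.fst := rfl
  rw [this]
  exact PySem.Dict.nodup_keys_counter xs

theorem dn0A_items (xs : List Char) :
    (dn0A xs).items = (slA xs).map (fun q => (q.2, q.1)) := by
  exact PySem.Dict.items_foldl_insert_fresh (slA xs) (fun q => q.2) (fun q => q.1) _
    (fun a _ => PySem.Dict.contains_empty _) (slA_snd_nodup xs)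

theorem dnA_items (xs : List Char) :
    (dnA xs).items = ((slA xs).map (fun q => (q.2, q.1))).filter (fun p => !(p.1 == '-')) := by
  show ((dn0A xs).items).filter _ = _
  rw [dn0A_items]

theorem dn0A_keys_nodup (xs : List Char) : (dn0A xs).keys.Nodup := by
  show ((dn0A xs).items.map Prod.fst).Nodup
  rw [dn0A_items, List.map_map]
  have : (Prod.fst ∘ fun q : Int × Char => (q.2, q.1)) = (fun q : Int × Char => q.2) := rfl
  rw [this]
  exact slA_snd_nodup xs

theorem dnA_keys_nodup (xs : List Char) : (dnA xs).keys.Nodup := by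
  have hsub : ((dnA xs).items.map Prod.fst).Sublist ((dn0A xs).items.map Prod.fst) := by
    rw [dnA_items, dn0A_items]
    exact List.Sublist.map Prod.fst List.filter_sublist
  exact hsub.nodup (dn0A_keys_nodup xs)

theorem dnA_getD_items (xs : List Char) : ∀ p ∈ (dnA xs).items, (dnA xs).getD p.1 0 = p.2 := by
  rintro ⟨k, v⟩ hp
  exact PySem.Dict.getD_of_mem_items _ hp (dnA_keys_nodup xs) 0

theorem dnA_pairwise (xs : List Char) :
    (dnA xs).keys.Pairwise (fun a b => lkA (dnA xs) b < lkA (dnA xs) a) := by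
  have h1 : (slA xs).Pairwise (fun a b => toLex (b.1, b.2) ≤ toLex (a.1, a.2)) :=
    PySem.List.sorted_pairwise_rev _ _
  have h2 : (slA xs).Pairwise (fun a b => b.2 ≠ a.2) := by
    have := (List.pairwise_map.mp (slA_snd_nodup xs))
    exact this.imp (fun h => fun he => h he.symm)
  have h3 : (slA xs).Pairwise (fun a b => toLex (b.1, b.2) < toLex (a.1, a.2)) := by
    refine (h1.and h2).imp ?_
    rintro a b ⟨hle, hne⟩
    refine lt_of_le_of_ne hle ?_
    intro he
    have := congrArg (fun x => (ofLex x).2) he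
    simp at this
    exact hne this
  have h4 : (dnA xs).items.Pairwise (fun p q => toLex (q.2, q.1) < toLex (p.2, p.1)) := by
    rw [dnA_items]
    refine List.Pairwise.sublist List.filter_sublist ?_
    rw [List.pairwise_map]
    exact h3
  show ((dnA xs).items.map Prod.fst).Pairwise _
  rw [List.pairwise_map]
  refine List.Pairwise.imp_of_mem ?_ h4
  intro p q hp hq hlt
  unfold lkA
  rw [dnA_getD_items xs p hp, dnA_getD_items xs q hq]
  exact hlt

theorem dnA_items_perm (xs : List Char) :
    (dnA xs).items.Perm (((PySem.Dict.counter xs).erase '-').items) := by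
  rw [dnA_items]
  show List.Perm _ ((PySem.Dict.counter xs).items.filter (fun p => !(p.1 == '-')))
  refine List.Perm.filter _ ?_
  have hperm : (slA xs).Perm ((PySem.Dict.counter xs).items.map (fun p => (p.2, p.1))) :=
    PySem.List.sorted_perm _ _ _
  have h2 := hperm.map (fun q : Int × Char => (q.2, q.1))
  rw [List.map_map] at h2
  have he : ((fun q : Int × Char => (q.2, q.1)) ∘ fun p : Char × Int => (p.2, p.1)) = id := rfl
  rw [he, List.map_id] at h2
  exact h2

theorem erase_counter_keys_nodup (xs : List Char) :
    ((PySem.Dict.counter xs).erase '-').keys.Nodup := by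
  have hsub : (((PySem.Dict.counter xs).erase '-').items.map Prod.fst).Sublist
      ((PySem.Dict.counter xs).items.map Prod.fst) :=
    List.Sublist.map Prod.fst List.filter_sublist
  exact hsub.nodup (PySem.Dict.nodup_keys_counter xs)

theorem dnA_getD (xs : List Char) (k : Char) :
    ((PySem.Dict.counter xs).erase '-').getD k 0 = (dnA xs).getD k 0 :=
  (getD_eq_of_items_perm _ _ (dnA_items_perm xs) (dnA_keys_nodup xs)
    (erase_counter_keys_nodup xs) k).symm

theorem dnA_keys_perm (xs : List Char) :
    ((PySem.Dict.counter xs).erase '-').keys.Perm ((dnA xs).keys) :=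
  ((dnA_items_perm xs).map Prod.fst).symm

theorem main_slice_eq (tuplo BDB : String) : validar_cifra tuplo BDB = validar_cifra_alt tuplo BDB := by
  unfold validar_cifra validar_cifra_alt
  rw [entrada_eq, crtl_eq]
  by_cases hg : (!validar_cifra_entrada_alt tuplo && validar_cod_crtl_alt BDB) = true
  · rw [if_pos hg, if_pos hg]
  · rw [if_neg hg, if_neg hg]
    dsimp only
    rw [counter_fold_eq]
    simp only [sorted2_eq_sorted_lex]
    rw [PySem.Dict.foldl_insert_getD_add_one_eq_counter]
    rw [if_erase_eq]
    suffices h : PySem.List.slice (aLoopA (dnA tuplo.toList) (dnA tuplo.toList).keys [] []) (some 0) (some 5)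
        = PySem.List.slice (PySem.List.sorted (((PySem.Dict.counter tuplo.toList).erase '-').keys)
            (fun k => toLex (-(((PySem.Dict.counter tuplo.toList).erase '-').getD k 0), k)) false)
            (some 0) (some 5) by
      exact congrArg (fun l => decide (l = (PySem.Str.slice BDB (some 1)
        (some (PySem.Str.len BDB - 1))).toList)) h
    have hBkey : (fun k => toLex (-(((PySem.Dict.counter tuplo.toList).erase '-').getD k 0), k))
        = lkB (dnA tuplo.toList) := by
      funext k
      unfold lkB
      rw [dnA_getD]
    rw [hBkey]
    rw [PySem.List.sorted_eq_sorted_of_perm _ _ _ (lkB_injective _) (dnA_keys_perm tuplo.toList)]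
    obtain ⟨R, hR, hpre, halt⟩ := aloop_spec (dnA tuplo.toList) (dnA_keys_nodup _) (dnA_pairwise _)
      (dnA tuplo.toList).keys.length (dnA tuplo.toList).keys [] le_rfl (List.suffix_refl _)
      (fun k hk k2 hk2 _ => hk2) (fun k _ => rfl)
    rw [hR, List.nil_append]
    rw [PySem.List.slice_zero_start, PySem.List.slice_zero_start,
      PySem.List.slice_to _ (by omega : (0:Int) ≤ 5), PySem.List.slice_to _ (by omega : (0:Int) ≤ 5)]
    rw [show Int.toNat 5 = 5 from rfl]
    rcases halt with h | h
    · rw [h]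
    · rw [take_eq_of_prefix_of_len R _ hpre (by simpa using h)]

-- ===== VERDICT (by name: the statement is the Claim_ definition above) =====
theorem validar_cifra_spec : Claim_equal_validar_cifra := by
  intro tuplo BDB _
  unfold Spec_validar_cifra
  exact main_slice_eq tuplo BDB
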